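-- pv_equiv track=rewrite | github.com/AlexanderDLe/Python_DataStructuresAndAlgorithms | Amazon/PlatesBetweenCandles.py | buildPlatesPerIndex
-- ===== SOURCE A (Python) =====
-- def buildPlatesPerIndex(s, n):
--   plates = [0] * n
--   count = 0
--
--   for i in range(n):
--     if s[i] == '*':
--       count += 1
--       plates[i] = count
--     else:
--       plates[i] = plates[i - 1]
--
--   return plates
-- ===== SOURCE B (Python) =====
-- def buildPlatesPerIndex(s, n):
--   # Collect the star positions first, then emit constant run-length segments
--   # between consecutive stars instead of testing every character in the main loop.
--   stars = [i for i in range(n) if s[i] == '*']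
--   out = []
--   prev = 0
--   count = 0
--   for p in stars:
--     out.extend([count] * (p - prev))
--     count += 1
--     out.append(count)
--     prev = p + 1
--   out.extend([count] * (n - prev))
--   return out
-- ===== Notes on version B (the rewrite author's own statement) =====
-- stated objective: alternative
-- what changed: Instead of A's single per-character loop that mutates a preallocated array (incrementing a counter or copying plates[i-1]), B first collects the list of star positions and then writes the output as constant run-length segments between consecutive stars.
import Mathlib
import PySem

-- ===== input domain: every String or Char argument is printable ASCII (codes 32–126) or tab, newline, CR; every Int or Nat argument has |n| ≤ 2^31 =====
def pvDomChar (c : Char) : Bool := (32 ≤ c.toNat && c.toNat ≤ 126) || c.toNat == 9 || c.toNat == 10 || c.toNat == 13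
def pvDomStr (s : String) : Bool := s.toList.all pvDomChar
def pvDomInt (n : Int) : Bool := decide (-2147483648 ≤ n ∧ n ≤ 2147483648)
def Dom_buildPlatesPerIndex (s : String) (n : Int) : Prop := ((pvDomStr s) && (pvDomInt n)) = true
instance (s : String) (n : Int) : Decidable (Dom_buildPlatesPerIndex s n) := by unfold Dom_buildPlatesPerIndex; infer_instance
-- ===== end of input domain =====

-- B replaces A's per-character mutate-in-place loop by collecting star positions first and emitting constant run-length segments between them (alternative; same O(n) cost).


-- ===== PORT A =====
-- for i in range(n): if s[i]=='*': count+=1; plates[i]=count else: plates[i]=plates[i-1]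
def buildPlatesPerIndex (s : String) (n : Int) : List Int :=
  let plates : List Int := List.replicate n.toNat 0
  let res := (PySem.List.pyRange 0 n 1).foldl
    (fun (st : List Int × Int) i =>
      if PySem.Str.pyGet? s i = some '*' then
        let count := st.2 + 1
        (PySem.List.pySetD st.1 i count, count)
      else
        (PySem.List.pySetD st.1 i (PySem.List.pyGetD st.1 (i - 1) 0), st.2))
    (plates, 0)
  res.1

-- ===== PORT B =====
-- stars = [i for i in range(n) if s[i]=='*']; then emit run-length segments between stars
def buildPlatesPerIndex_alt (s : String) (n : Int) : List Int :=
  let stars := (PySem.List.pyRange 0 n 1).filter (fun i => PySem.Str.pyGet? s i == some '*')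
  let res := stars.foldl
    (fun (st : List Int × Int × Int) p =>
      ((st.1 ++ List.replicate (p - st.2.1).toNat st.2.2) ++ [st.2.2 + 1], p + 1, st.2.2 + 1))
    ([], 0, 0)
  res.1 ++ List.replicate (n - res.2.1).toNat res.2.2

-- ===== PRECONDITION & SPEC =====
-- Pre_ excludes n > len(s), on which Python A raises IndexError at index len(s).
def Pre_buildPlatesPerIndex (s : String) (n : Int) : Prop := n ≤ (s.toList.length : Int)
instance (s : String) (n : Int) : Decidable (Pre_buildPlatesPerIndex s n) := by unfold Pre_buildPlatesPerIndex; infer_instance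
def pvWitness_buildPlatesPerIndex : String × Int := ("*a*", 3)

def Spec_buildPlatesPerIndex (s : String) (n : Int) (out : List Int) : Prop := out = buildPlatesPerIndex_alt s n
instance (s : String) (n : Int) (out : List Int) : Decidable (Spec_buildPlatesPerIndex s n out) := by unfold Spec_buildPlatesPerIndex; infer_instance

-- ===== CLAIM (what is proved, stated in full; the proofs are below) =====
def Claim_equal_buildPlatesPerIndex : Prop := ∀ (s : String) (n : Int), Dom_buildPlatesPerIndex s n → Pre_buildPlatesPerIndex s n → Spec_buildPlatesPerIndex s n (buildPlatesPerIndex s n)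

-- ===== LEMMAS AND PROOFS =====

-- running count of '*' among the first m characters
def pvCnt (cs : List Char) (m : Nat) : Int := ((cs.take m).countP (· = '*') : Int)

-- prefix-count list for indices a..b-1: entry k is the count up to index a+k inclusive
def pvSeg (cs : List Char) (a b : Nat) : List Int := (List.range (b - a)).map (fun k => pvCnt cs (a + k + 1))

-- B's/A's full prefix list for the first m indices
def pvPref (cs : List Char) (m : Nat) : List Int := (List.range m).map (fun k => pvCnt cs (k + 1))

theorem pvCnt_succ (cs : List Char) (m : Nat) :
    pvCnt cs (m + 1) = pvCnt cs m + (if cs[m]? = some '*' then 1 else 0) := by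
  unfold pvCnt
  rw [List.take_add_one, List.countP_append]
  cases h : cs[m]? with
  | none => simp
  | some c =>
    by_cases hc : c = '*' <;> simp [hc]

theorem pvPref_succ (cs : List Char) (m : Nat) :
    pvPref cs (m + 1) = pvPref cs m ++ [pvCnt cs (m + 1)] := by
  unfold pvPref
  rw [List.range_succ, List.map_append]
  simp

theorem pvPref_eq_pvSeg (cs : List Char) (m : Nat) : pvPref cs m = pvSeg cs 0 m := by
  simp [pvPref, pvSeg]

theorem pvSeg_succ (cs : List Char) (a b : Nat) (hab : a ≤ b) :
    pvSeg cs a (b + 1) = pvSeg cs a b ++ [pvCnt cs (b + 1)] := by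
  unfold pvSeg
  have h1 : b + 1 - a = (b - a) + 1 := by omega
  rw [h1, List.range_succ, List.map_append]
  have h2 : a + (b - a) + 1 = b + 1 := by omega
  simp [h2]

theorem pvCnt_const (cs : List Char) (a b : Nat) (hab : a ≤ b)
    (hns : ∀ j, a ≤ j → j < b → cs[j]? ≠ some '*') :
    pvCnt cs b = pvCnt cs a := by
  induction b, hab using Nat.le_induction with
  | base => rfl
  | succ b hab ih =>
    rw [pvCnt_succ, if_neg (hns b hab (by omega))]
    rw [ih (fun j h1 h2 => hns j h1 (by omega))]
    ring

theorem pvSeg_const (cs : List Char) (a b : Nat) (hab : a ≤ b)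
    (hns : ∀ j, a ≤ j → j < b → cs[j]? ≠ some '*') :
    pvSeg cs a b = List.replicate (b - a) (pvCnt cs a) := by
  induction b, hab using Nat.le_induction with
  | base => simp [pvSeg]
  | succ b hab ih =>
    rw [pvSeg_succ cs a b hab, ih (fun j h1 h2 => hns j h1 (by omega))]
    have h1 : b + 1 - a = (b - a) + 1 := by omega
    have h2 : pvCnt cs (b + 1) = pvCnt cs a := by
      rw [pvCnt_succ, if_neg (hns b hab (by omega)),
        pvCnt_const cs a b hab (fun j j1 j2 => hns j j1 (by omega))]
      ring
    rw [h1, h2, List.replicate_succ']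

theorem pvSeg_append (cs : List Char) (a b c : Nat) (hab : a ≤ b) (hbc : b ≤ c) :
    pvSeg cs a c = pvSeg cs a b ++ pvSeg cs b c := by
  induction c, hbc using Nat.le_induction with
  | base => simp [pvSeg]
  | succ c hbc ih =>
    rw [pvSeg_succ cs a c (by omega), pvSeg_succ cs b c hbc, ih, List.append_assoc]

-- B's fold over the stars of [a, b) from a lagging state (out, q, cnt q)
theorem pvB_fold (cs : List Char) (b : Nat) (hb : b ≤ cs.length) (d : Nat) (q a : Nat)
    (hqa : q ≤ a) (hab : a + d = b)
    (hns : ∀ j, q ≤ j → j < a → cs[j]? ≠ some '*') (out : List Int) :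
    ∃ p, q ≤ p ∧ p ≤ b ∧ (∀ j, p ≤ j → j < b → cs[j]? ≠ some '*') ∧
      ((PySem.List.pyRange (a : Int) (b : Int) 1).filter
          (fun i => PySem.List.pyGet? cs i == some '*')).foldl
        (fun (st : List Int × Int × Int) p =>
          ((st.1 ++ List.replicate (p - st.2.1).toNat st.2.2) ++ [st.2.2 + 1], p + 1, st.2.2 + 1))
        (out, (q : Int), pvCnt cs q)
      = (out ++ pvSeg cs q p, (p : Int), pvCnt cs p) := by
  induction d generalizing q a out with
  | zero =>
    refine ⟨q, le_rfl, by omega, by simpa [show a = b by omega] using hns, ?_⟩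
    rw [PySem.List.pyRange_one_eq_nil (by omega)]
    simp [pvSeg]
  | succ d ih =>
    have hcons : PySem.List.pyRange (a : Int) (b : Int) 1
        = (a : Int) :: PySem.List.pyRange ((a : Int) + 1) (b : Int) 1 :=
      PySem.List.pyRange_one_cons (by omega)
    have halt : a < cs.length := by omega
    have hget : PySem.List.pyGet? cs (a : Int) = some cs[a] := by
      rw [PySem.List.pyGet?_natCast]
      simp [halt]
    have hcast : ((a : Int) + 1) = ((a + 1 : Nat) : Int) := by push_cast; ring
    rw [hcons, List.filter_cons]
    by_cases hstar : cs[a] = '*'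
    · have hcond : (PySem.List.pyGet? cs (a : Int) == some '*') = true := by
        simp [hget, hstar]
      rw [if_pos hcond, List.foldl_cons]
      -- evaluate the single step
      have hsub : (((a : Int)) - (q : Int)).toNat = a - q := by omega
      have hcq : pvCnt cs q = pvCnt cs a := (pvCnt_const cs q a hqa hns).symm
      have hc1 : pvCnt cs q + 1 = pvCnt cs (a + 1) := by
        rw [pvCnt_succ, List.getElem?_eq_getElem halt, if_pos (by simp [hstar]), hcq]
      have hrep : List.replicate (a - q) (pvCnt cs q) = pvSeg cs q a := by
        rw [pvSeg_const cs q a hqa hns]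
      have hseg : pvSeg cs q a ++ [pvCnt cs (a + 1)] = pvSeg cs q (a + 1) :=
        (pvSeg_succ cs q a hqa).symm
      simp only [hsub, hrep, hc1, hcast]
      rw [show (out ++ pvSeg cs q a) ++ [pvCnt cs (a + 1)] = out ++ pvSeg cs q (a + 1) by
        rw [List.append_assoc, hseg]]
      obtain ⟨p, hp1, hp2, hp3, hp4⟩ :=
        ih (a + 1) (a + 1) le_rfl (by omega) (fun j h1 h2 => absurd h2 (by omega))
          (out ++ pvSeg cs q (a + 1))
      refine ⟨p, by omega, hp2, hp3, ?_⟩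
      rw [hp4, List.append_assoc, ← pvSeg_append cs q (a + 1) p (by omega) hp1]
    · have hcond : (PySem.List.pyGet? cs (a : Int) == some '*') = false := by
        simp [hget, hstar]
      rw [if_neg (by simp [List.getElem?_eq_getElem halt, hstar])]
      have hns' : ∀ j, q ≤ j → j < a + 1 → cs[j]? ≠ some '*' := by
        intro j h1 h2
        by_cases hj : j = a
        · subst hj
          simp [List.getElem?_eq_getElem halt, hstar]
        · exact hns j h1 (by omega)
      rw [hcast]
      exact ih q (a + 1) (by omega) (by omega) hns' out

theorem pvB_eval (s : String) (n : Int) (hpre : n ≤ (s.toList.length : Int)) :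
    buildPlatesPerIndex_alt s n = pvPref s.toList n.toNat := by
  unfold buildPlatesPerIndex_alt
  have hbridge : (fun i => PySem.Str.pyGet? s i == some '*')
      = (fun i => PySem.List.pyGet? s.toList i == some '*') := by
    funext i
    simp [PySem.Str.pyGet?]
  rw [hbridge]
  by_cases hn : 0 ≤ n
  · have hcast : n = (n.toNat : Int) := (Int.toNat_of_nonneg hn).symm
    have hN : n.toNat ≤ s.toList.length := by omega
    have h0 : pvCnt s.toList 0 = 0 := by simp [pvCnt]
    obtain ⟨p, hp1, hp2, hp3, hp4⟩ :=
      pvB_fold s.toList n.toNat hN n.toNat 0 0 le_rfl (by omega)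
        (fun j h1 h2 => absurd h2 (by omega)) []
    rw [hcast]
    simp only [Nat.cast_zero, h0] at hp4
    simp only [Int.toNat_natCast, hp4, List.nil_append]
    have hsub : (((n.toNat : Nat) : Int) - (p : Int)).toNat = n.toNat - p := by omega
    rw [hsub, ← pvSeg_const s.toList p n.toNat hp2 hp3,
      ← pvSeg_append s.toList 0 p n.toNat (by omega) hp2, pvPref_eq_pvSeg]
  · have h0 : n.toNat = 0 := by omega
    rw [PySem.List.pyRange_one_eq_nil (by omega)]
    simp [h0, pvPref]

theorem pvPref_length (cs : List Char) (m : Nat) : (pvPref cs m).length = m := by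
  simp [pvPref]

-- A's loop invariant: after the first m iterations (m ≤ n, n ≤ len s) the state is
-- (pvPref m ++ zeros, pvCnt m)
theorem pvA_fold (cs : List Char) (N : Nat) (hN : N ≤ cs.length) (m : Nat) (hm : m ≤ N) :
    (PySem.List.pyRange 0 (m : Int) 1).foldl
      (fun (st : List Int × Int) i =>
        if PySem.List.pyGet? cs i = some '*' then
          (PySem.List.pySetD st.1 i (st.2 + 1), st.2 + 1)
        else
          (PySem.List.pySetD st.1 i (PySem.List.pyGetD st.1 (i - 1) 0), st.2))
      (List.replicate N 0, 0)
    = (pvPref cs m ++ List.replicate (N - m) 0, pvCnt cs m) := by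
  induction m with
  | zero => simp [pvPref, pvCnt, PySem.List.pyRange_one_eq_nil]
  | succ m ih =>
    have hm' : m ≤ N := Nat.le_of_succ_le hm
    have hpeel : PySem.List.pyRange 0 ((m : Int) + 1) 1
        = PySem.List.pyRange 0 (m : Int) 1 ++ [(m : Int)] :=
      PySem.List.pyRange_one_succ_right (by positivity)
    push_cast
    rw [hpeel, List.foldl_append, ih hm']
    simp only [List.foldl_cons, List.foldl_nil]
    have hmlt : m < cs.length := lt_of_lt_of_le hm hN
    have hget : PySem.List.pyGet? cs (m : Int) = some cs[m] := by
      rw [PySem.List.pyGet?_natCast]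
      simp [hmlt]
    -- setting index m in (pvPref m ++ replicate (N-m) 0) appends v in front of the zeros
    have hset : ∀ v : Int,
        PySem.List.pySetD (pvPref cs m ++ List.replicate (N - m) 0) (m : Int) v
        = pvPref cs m ++ [v] ++ List.replicate (N - (m + 1)) 0 := by
      intro v
      rw [PySem.List.pySetD_natCast, List.set_append]
      simp only [pvPref_length, lt_irrefl, Nat.sub_self]
      have : List.replicate (N - m) (0:Int) = 0 :: List.replicate (N - (m+1)) 0 := by
        rw [← List.replicate_succ]
        congr 1
        omega
      rw [this]
      simp
    by_cases hstar : cs[m] = '*'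
    · rw [hget]
      simp only [hstar]
      rw [hset]
      have : pvCnt cs (m + 1) = pvCnt cs m + 1 := by
        rw [pvCnt_succ]
        simp [List.getElem?_eq_getElem hmlt, hstar]
      rw [pvPref_succ, this]
      simp
    · rw [hget, if_neg (by simp [hstar])]
      have hcnt : pvCnt cs (m + 1) = pvCnt cs m := by
        rw [pvCnt_succ]
        simp [List.getElem?_eq_getElem hmlt, hstar]
      -- the read plates[m-1] yields pvCnt m in both the m = 0 and m > 0 cases
      have hread : PySem.List.pyGetD (pvPref cs m ++ List.replicate (N - m) 0) ((m : Int) - 1) 0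
          = pvCnt cs m := by
        cases m with
        | zero =>
          have h1 : 1 ≤ N := by omega
          have h2 : N - 1 < N := by omega
          simp only [Nat.cast_zero, zero_sub, pvPref, List.range_zero, List.map_nil,
            List.nil_append]
          simp [PySem.List.pyGetD, PySem.List.pyGet?, PySem.List.pyIdx?, h1,
            List.getElem?_replicate, h2, pvCnt]
        | succ k =>
          have heq : ((k : Int) + 1) - 1 = ((k : Nat) : Int) := by ring
          push_cast
          rw [heq, PySem.List.pyGetD_natCast]
          rw [List.getD_append _ _ _ _ (by simp [pvPref_length])]
          simp [pvPref, List.getD_eq_getElem?_getD, pvCnt]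
      rw [hread, hset, pvPref_succ, hcnt]

theorem pvA_eval (s : String) (n : Int) (hpre : n ≤ (s.toList.length : Int)) :
    buildPlatesPerIndex s n = pvPref s.toList n.toNat := by
  unfold buildPlatesPerIndex
  have hstep : ∀ (st : List Int × Int) (i : Int),
      (if PySem.Str.pyGet? s i = some '*' then
        let count := st.2 + 1
        (PySem.List.pySetD st.1 i count, count)
      else
        (PySem.List.pySetD st.1 i (PySem.List.pyGetD st.1 (i - 1) 0), st.2))
      = (if PySem.List.pyGet? s.toList i = some '*' then
          (PySem.List.pySetD st.1 i (st.2 + 1), st.2 + 1)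
        else
          (PySem.List.pySetD st.1 i (PySem.List.pyGetD st.1 (i - 1) 0), st.2)) := by
    intro st i
    have h : PySem.Str.pyGet? s i = PySem.List.pyGet? s.toList i := by
      simp [PySem.Str.pyGet?]
    rw [h]
  simp only [hstep]
  by_cases hn : 0 ≤ n
  · have hcast : n = (n.toNat : Int) := (Int.toNat_of_nonneg hn).symm
    have hN : n.toNat ≤ s.toList.length := by omega
    rw [hcast]
    simp only [Int.toNat_natCast]
    rw [pvA_fold s.toList n.toNat hN n.toNat le_rfl]
    simp
  · have h0 : n.toNat = 0 := by omega
    rw [PySem.List.pyRange_one_eq_nil (by omega)]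
    simp [h0, pvPref]

-- ===== VERDICT (by name: the statement is the Claim_ definition above) =====
theorem buildPlatesPerIndex_spec : Claim_equal_buildPlatesPerIndex := by
  intro s n _ hpre
  unfold Spec_buildPlatesPerIndex
  rw [pvA_eval s n hpre, pvB_eval s n hpre]
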